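-- pv_equiv track=rewrite | github.com/foundry-works/foundry-mcp | src/foundry_mcp/core/autonomy/step_emitters.py | _all_implementation_tasks_complete
-- ===== SOURCE A (Python) =====
-- from typing import TYPE_CHECKING, Any, Dict, List, Optional, Protocol, Tuple
--
-- def _all_implementation_tasks_complete(
--
--     phase: Dict[str, Any],
--     completed_task_ids: List[str],
-- ) -> bool:
--     """Check whether all implementation tasks in a phase are complete."""
--     for task in phase.get("tasks", []):
--         task_type = task.get("type", "task")
--         task_id = task.get("id", "")
--         if task_type == "task" and task_id not in completed_task_ids:
--             return False
--     return True
-- ===== SOURCE B (Python) =====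
-- from typing import Any, Dict, List
--
--
-- def _all_implementation_tasks_complete(
--     phase: Dict[str, Any],
--     completed_task_ids: List[str],
-- ) -> bool:
--     """Check whether all implementation tasks in a phase are complete."""
--     pending = set()
--     for t in phase.get("tasks", []):
--         if t.get("type", "task") == "task":
--             pending.add(t.get("id", ""))
--     for cid in completed_task_ids:
--         pending.discard(cid)
--         if not pending:
--             return True
--     return not pending
-- ===== Notes on version B (the rewrite author's own statement) =====
-- stated objective: alternative
-- what changed: Inverts the data flow: instead of scanning tasks and testing each id for membership in completed_task_ids, B first collects the pending set of required task ids and then consumes completed_task_ids one by one, discarding each from the pending set and returning True as soon as nothing is pending; the answer is whether the pending set is exhausted.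
import Mathlib
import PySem

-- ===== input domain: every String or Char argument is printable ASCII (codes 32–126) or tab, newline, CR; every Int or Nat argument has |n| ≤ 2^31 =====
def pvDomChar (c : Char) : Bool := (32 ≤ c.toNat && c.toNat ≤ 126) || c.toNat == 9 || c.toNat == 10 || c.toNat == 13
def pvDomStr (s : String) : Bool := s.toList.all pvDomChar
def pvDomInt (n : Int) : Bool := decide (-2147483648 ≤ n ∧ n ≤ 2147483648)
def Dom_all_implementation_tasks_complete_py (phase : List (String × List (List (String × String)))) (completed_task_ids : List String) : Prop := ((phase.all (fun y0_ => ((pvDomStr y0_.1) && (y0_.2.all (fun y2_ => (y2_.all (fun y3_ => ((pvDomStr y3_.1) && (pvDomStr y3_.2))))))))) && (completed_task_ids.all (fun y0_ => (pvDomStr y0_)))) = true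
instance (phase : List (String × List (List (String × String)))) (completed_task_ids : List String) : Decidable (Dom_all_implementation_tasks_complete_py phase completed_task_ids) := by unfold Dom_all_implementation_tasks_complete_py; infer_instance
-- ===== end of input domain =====

-- B inverts the data flow: it collects the pending set of required task ids, then consumes
-- completed_task_ids one by one, discarding each from pending (early True once empty) — an
-- alternative algorithm with no membership test against the completed list.

-- ===== PORT A =====
-- the 'for task in …: if …: return False' loop, early return and all
def pvLoopA (completed_task_ids : List String) : List (List (String × String)) → Bool
  | [] => true
  | task :: rest =>
    let task_type := (PySem.Dict.mk task).getD "type" "task"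
    let task_id := (PySem.Dict.mk task).getD "id" ""
    if task_type == "task" && !(completed_task_ids.contains task_id) then false
    else pvLoopA completed_task_ids rest

def all_implementation_tasks_complete_py (phase : List (String × List (List (String × String)))) (completed_task_ids : List String) : Bool :=
  pvLoopA completed_task_ids ((PySem.Dict.mk phase).getD "tasks" [])

-- ===== PORT B =====
-- first loop: pending = set(); for t in tasks: if type=="task": pending.add(id)
def pvPendingB (tasks : List (List (String × String))) : PySem.Set String :=
  tasks.foldl
    (fun pending t =>
      if (PySem.Dict.mk t).getD "type" "task" == "task" then
        PySem.Set.add pending ((PySem.Dict.mk t).getD "id" "")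
      else pending)
    PySem.Set.empty

-- second loop: for cid in completed: pending.discard(cid); if not pending: return True
-- final: return not pending
def pvDrainB (pending : PySem.Set String) : List String → Bool
  | [] => pending.isEmpty
  | cid :: rest =>
    let pending' := PySem.Set.discard pending cid
    if pending'.isEmpty then true else pvDrainB pending' rest

def all_implementation_tasks_complete_py_alt (phase : List (String × List (List (String × String)))) (completed_task_ids : List String) : Bool :=
  pvDrainB (pvPendingB ((PySem.Dict.mk phase).getD "tasks" [])) completed_task_ids

-- ===== PRECONDITION & SPEC =====
def Spec_all_implementation_tasks_complete_py (phase : List (String × List (List (String × String)))) (completed_task_ids : List String) (out : Bool) : Prop := out = all_implementation_tasks_complete_py_alt phase completed_task_ids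
instance (phase : List (String × List (List (String × String)))) (completed_task_ids : List String) (out : Bool) : Decidable (Spec_all_implementation_tasks_complete_py phase completed_task_ids out) := by unfold Spec_all_implementation_tasks_complete_py; infer_instance

-- ===== CLAIM (what is proved, stated in full; the proofs are below) =====
def Claim_equal_all_implementation_tasks_complete_py : Prop := ∀ (phase : List (String × List (List (String × String)))) (completed_task_ids : List String), Dom_all_implementation_tasks_complete_py phase completed_task_ids → Spec_all_implementation_tasks_complete_py phase completed_task_ids (all_implementation_tasks_complete_py phase completed_task_ids)

-- ===== LEMMAS AND PROOFS =====

theorem pvLoopA_iff (completed : List String) (ts : List (List (String × String))) :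
    pvLoopA completed ts = true ↔
      ∀ t ∈ ts, (PySem.Dict.mk t).getD "type" "task" = "task" →
        (PySem.Dict.mk t).getD "id" "" ∈ completed := by
  induction ts with
  | nil => simp [pvLoopA]
  | cons t rest ih =>
    simp only [pvLoopA, List.mem_cons]
    by_cases h : (PySem.Dict.mk t).getD "type" "task" = "task"
    · by_cases hm : (PySem.Dict.mk t).getD "id" "" ∈ completed
      · simp [h, hm, ih]
      · simp [h, hm]
    · simp [h, ih]

theorem mem_pvPendingB_foldl (ts : List (List (String × String))) (s : PySem.Set String) (x : String) :
    x ∈ ts.foldl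
        (fun pending t =>
          if (PySem.Dict.mk t).getD "type" "task" == "task" then
            PySem.Set.add pending ((PySem.Dict.mk t).getD "id" "")
          else pending) s ↔
      x ∈ s ∨ ∃ t ∈ ts, (PySem.Dict.mk t).getD "type" "task" = "task" ∧
        (PySem.Dict.mk t).getD "id" "" = x := by
  induction ts generalizing s with
  | nil => simp
  | cons t rest ih =>
    simp only [List.foldl_cons]
    by_cases h : (PySem.Dict.mk t).getD "type" "task" = "task"
    · rw [if_pos (by simp [h])]
      rw [ih, PySem.Set.mem_add]
      constructor
      · rintro (⟨hs | he⟩ | ht)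
        · exact Or.inl hs
        · exact Or.inr ⟨t, List.mem_cons_self, h, he.symm⟩
        · rcases ht with ⟨u, hu, h1, h2⟩
          exact Or.inr ⟨u, List.mem_cons_of_mem _ hu, h1, h2⟩
      · rintro (hs | ⟨u, hu, h1, h2⟩)
        · exact Or.inl (Or.inl hs)
        · rcases List.mem_cons.mp hu with rfl | hu'
          · exact Or.inl (Or.inr h2.symm)
          · exact Or.inr ⟨u, hu', h1, h2⟩
    · rw [if_neg (by simp [h])]
      rw [ih]
      constructor
      · rintro (hs | ⟨u, hu, h1, h2⟩)
        · exact Or.inl hs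
        · exact Or.inr ⟨u, List.mem_cons_of_mem _ hu, h1, h2⟩
      · rintro (hs | ⟨u, hu, h1, h2⟩)
        · exact Or.inl hs
        · rcases List.mem_cons.mp hu with rfl | hu'
          · exact absurd h1 h
          · exact Or.inr ⟨u, hu', h1, h2⟩

theorem pvDrainB_iff (cs : List String) (p : PySem.Set String) :
    pvDrainB p cs = true ↔ ∀ x ∈ p, x ∈ cs := by
  induction cs generalizing p with
  | nil =>
    simp [pvDrainB, List.isEmpty_iff, List.eq_nil_iff_forall_not_mem]
  | cons c rest ih =>
    simp only [pvDrainB]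
    by_cases h : (PySem.Set.discard p c).isEmpty = true
    · rw [if_pos h]
      have hd : ∀ x ∈ p, x = c := by
        intro x hx
        by_contra hne
        have : x ∈ PySem.Set.discard p c := (PySem.Set.mem_discard _ _ _).mpr ⟨hx, hne⟩
        rw [List.isEmpty_iff] at h
        simp [h] at this
      simp only [true_iff]
      intro x hx
      exact List.mem_cons.mpr (Or.inl (hd x hx))
    · rw [if_neg h, ih]
      constructor
      · intro hall x hx
        by_cases hc : x = c
        · exact List.mem_cons.mpr (Or.inl hc)
        · exact List.mem_cons.mpr (Or.inr (hall x ((PySem.Set.mem_discard _ _ _).mpr ⟨hx, hc⟩)))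
      · intro hall x hx
        rcases (PySem.Set.mem_discard _ _ _).mp hx with ⟨hxp, hne⟩
        rcases List.mem_cons.mp (hall x hxp) with rfl | hr
        · exact absurd rfl hne
        · exact hr

-- ===== VERDICT (by name: the statement is the Claim_ definition above) =====
theorem all_implementation_tasks_complete_py_spec : Claim_equal_all_implementation_tasks_complete_py := by
  intro phase completed _
  unfold Spec_all_implementation_tasks_complete_py all_implementation_tasks_complete_py
    all_implementation_tasks_complete_py_alt
  rw [Bool.eq_iff_iff, pvLoopA_iff, pvDrainB_iff]
  constructor
  · intro h x hx
    rcases (mem_pvPendingB_foldl _ _ _).mp hx with hs | ⟨t, ht, h1, h2⟩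
    · simp [PySem.Set.empty] at hs
    · exact h2 ▸ h t ht h1
  · intro h t ht h1
    exact h _ ((mem_pvPendingB_foldl _ _ _).mpr (Or.inr ⟨t, ht, h1, rfl⟩))
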